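-- pv_equiv track=rewrite | github.com/jennjwang/SparkMe | src/utils/task_hierarchy.py | _normalize_verb_prefix
-- ===== SOURCE A (Python) =====
-- from typing import List, Dict, Any, Set
--
-- _VERB_SYNONYMS: Dict[str, str] = {
--     "coming up with": "generating",
--     "come up with": "generating",
--     "creating": "generating",
--     "drafting": "writing",
--     "composing": "writing",
--     "authoring": "writing",
--     "having meetings with": "meeting with",
--     "have meetings with": "meeting with",
--     "participating in": "attending",
--     "taking part in": "attending",
-- }
--
-- _VERB_SYNONYM_KEYS: List[str] = sorted(_VERB_SYNONYMS, key=len, reverse=True)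
--
-- def _normalize_verb_prefix(stem: str) -> str:
--     """Replace a known verb-synonym prefix with its canonical form."""
--     for key in _VERB_SYNONYM_KEYS:
--         if stem == key:
--             return _VERB_SYNONYMS[key]
--         prefix = key + " "
--         if stem.startswith(prefix):
--             return _VERB_SYNONYMS[key] + " " + stem[len(prefix):]
--     return stem
-- ===== SOURCE B (Python) =====
-- from typing import Dict
--
-- _VERB_SYNONYMS: Dict[str, str] = {
--     "coming up with": "generating",
--     "come up with": "generating",
--     "creating": "generating",
--     "drafting": "writing",
--     "composing": "writing",
--     "authoring": "writing",
--     "having meetings with": "meeting with",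
--     "have meetings with": "meeting with",
--     "participating in": "attending",
--     "taking part in": "attending",
-- }
--
-- _MAX_KEY_LEN = max(map(len, _VERB_SYNONYMS))
--
--
-- def _normalize_verb_prefix(stem: str) -> str:
--     """Replace a known verb-synonym prefix with its canonical form.
--
--     Instead of scanning every synonym key, walk the word boundaries of the
--     stem from the longest candidate prefix down and look each prefix up in
--     the dictionary; the first (longest) hit is replaced.
--     """
--     for p in range(min(len(stem), _MAX_KEY_LEN), -1, -1):
--         if p == len(stem) or stem[p] == " ":
--             canon = _VERB_SYNONYMS.get(stem[:p])
--             if canon is not None: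
--                 return canon + stem[p:]
--     return stem
-- ===== Notes on version B (the rewrite author's own statement) =====
-- stated objective: alternative
-- what changed: Instead of scanning the ten synonym keys and string-comparing each against the stem, B walks the stem's candidate cut positions from min(len(stem), max key length) down, and at each word boundary does one dictionary lookup of the prefix; the first (longest) hit is replaced.
import Mathlib
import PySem

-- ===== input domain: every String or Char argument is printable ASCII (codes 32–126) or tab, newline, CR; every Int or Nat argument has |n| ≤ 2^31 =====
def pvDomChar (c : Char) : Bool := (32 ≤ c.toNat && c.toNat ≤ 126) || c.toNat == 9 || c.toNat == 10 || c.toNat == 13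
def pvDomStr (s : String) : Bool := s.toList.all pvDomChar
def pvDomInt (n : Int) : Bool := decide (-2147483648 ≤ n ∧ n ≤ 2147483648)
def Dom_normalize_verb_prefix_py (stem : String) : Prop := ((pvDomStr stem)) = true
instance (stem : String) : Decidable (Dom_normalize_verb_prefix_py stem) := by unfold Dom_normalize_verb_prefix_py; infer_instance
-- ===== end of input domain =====

-- B replaces A's scan over the ten synonym keys by dictionary lookups of the stem's
-- word-boundary prefixes, longest first (objective: alternative algorithm, same result).

-- ===== PORT A =====
-- the module constant _VERB_SYNONYMS (keys/values kept as List Char; ports work on stem.toList)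
def pvPairs : List (List Char × List Char) :=
  [("coming up with".toList, "generating".toList),
   ("come up with".toList, "generating".toList),
   ("creating".toList, "generating".toList),
   ("drafting".toList, "writing".toList),
   ("composing".toList, "writing".toList),
   ("authoring".toList, "writing".toList),
   ("having meetings with".toList, "meeting with".toList),
   ("have meetings with".toList, "meeting with".toList),
   ("participating in".toList, "attending".toList),
   ("taking part in".toList, "attending".toList)]

def pvSyn : PySem.Dict (List Char) (List Char) := PySem.Dict.ofList pvPairs

-- _VERB_SYNONYM_KEYS = sorted(_VERB_SYNONYMS, key=len, reverse=True)
def pvKeys : List (List Char) :=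
  PySem.List.sorted pvSyn.keys (fun k => PySem.Chars.len k) true

-- the for-loop of A; every key of pvKeys is a key of pvSyn, so _VERB_SYNONYMS[key]
-- never raises: (pvSyn.get? key).getD [] is its total form
def pvALoop (s : List Char) : List (List Char) → String
  | [] => String.ofList s
  | key :: rest =>
    if s = key then String.ofList ((pvSyn.get? key).getD [])
    else
      if PySem.Chars.startswith s (key ++ [' ']) = true then
        String.ofList ((pvSyn.get? key).getD [] ++ [' '] ++
          PySem.List.slice s (some (((key ++ [' ']).length : Nat) : Int)) none)
      else pvALoop s rest

def normalize_verb_prefix_py (stem : String) : String :=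
  pvALoop stem.toList pvKeys

-- ===== PORT B =====
-- _MAX_KEY_LEN = max(map(len, _VERB_SYNONYMS)); the dict is non-empty so max never raises
def pvMaxKeyLen : Int :=
  (PySem.List.max? (pvSyn.keys.map (fun k => PySem.Chars.len k)) (fun n => n)).getD 0

-- one iteration of B's for-loop body: some r = "return r", none = fall through
def pvBStep (s : List Char) (p : Nat) : Option String :=
  if p = s.length ∨ PySem.List.pyGet? s ((p : Nat) : Int) = some ' ' then
    (pvSyn.get? (PySem.List.slice s none (some ((p : Nat) : Int)))).map
      (fun canon => String.ofList (canon ++ PySem.List.slice s (some ((p : Nat) : Int)) none))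
  else none

-- for p in range(start, -1, -1): … (counts p, p-1, …, 0, then returns stem)
def pvBLoop (s : List Char) : Nat → String
  | 0 =>
    match pvBStep s 0 with
    | some r => r
    | none => String.ofList s
  | q + 1 =>
    match pvBStep s (q + 1) with
    | some r => r
    | none => pvBLoop s q

-- min(len(stem), _MAX_KEY_LEN) is a min of two non-negative ints; .toNat converts it
-- exactly to the Nat count of loop iterations
def normalize_verb_prefix_py_alt (stem : String) : String :=
  pvBLoop stem.toList ((min ((stem.toList.length : Nat) : Int) pvMaxKeyLen).toNat)

-- ===== PRECONDITION & SPEC =====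
def Spec_normalize_verb_prefix_py (stem : String) (out : String) : Prop := out = normalize_verb_prefix_py_alt stem
instance (stem : String) (out : String) : Decidable (Spec_normalize_verb_prefix_py stem out) := by unfold Spec_normalize_verb_prefix_py; infer_instance

-- ===== CLAIM (what is proved, stated in full; the proofs are below) =====
def Claim_equal_normalize_verb_prefix_py : Prop := ∀ (stem : String), Dom_normalize_verb_prefix_py stem → Spec_normalize_verb_prefix_py stem (normalize_verb_prefix_py stem)

-- ===== LEMMAS AND PROOFS =====

theorem pvKeys_eq : pvKeys =
    ["having meetings with".toList, "have meetings with".toList,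
     "participating in".toList, "coming up with".toList, "taking part in".toList,
     "come up with".toList, "composing".toList, "authoring".toList,
     "creating".toList, "drafting".toList] := by decide

theorem pvMaxKeyLen_eq : pvMaxKeyLen = 20 := by decide

-- "this prefix matches here": the stem starts with k and k ends at a word boundary
def pvMatch (s k : List Char) : Prop :=
  s.take k.length = k ∧ (k.length = s.length ∨ s[k.length]? = some ' ')

theorem match_iff (s k : List Char) :
    pvMatch s k ↔ (s = k ∨ PySem.Chars.startswith s (k ++ [' ']) = true) := by
  rw [PySem.Chars.startswith_iff]
  constructor
  · rintro ⟨ht, hb | hb⟩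
    · left
      rw [← ht, hb, List.take_length]
    · right
      have hlt : k.length < s.length := List.getElem?_eq_some_iff.mp hb |>.1
      refine ⟨s.drop (k.length + 1), ?_⟩
      have hdrop : s.drop k.length = ' ' :: s.drop (k.length + 1) := by
        rw [List.drop_eq_getElem_cons hlt]
        congr 1
        have := List.getElem?_eq_some_iff.mp hb
        exact this.2 ▸ rfl
      calc (k ++ [' ']) ++ s.drop (k.length + 1) = k ++ (' ' :: s.drop (k.length + 1)) := by simp
        _ = s.take k.length ++ s.drop k.length := by rw [ht, hdrop]
        _ = s := List.take_append_drop _ _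
  · rintro (rfl | ⟨t, rfl⟩)
    · exact ⟨List.take_length, Or.inl rfl⟩
    · constructor
      · rw [List.append_assoc, List.take_append_of_le_length (by simp)]
        simp
      · right
        rw [List.append_assoc]
        rw [List.getElem?_append_right (by simp)]
        simp

theorem get?_mem (l v : List Char) (h : pvSyn.get? l = some v) : (l, v) ∈ pvPairs := by
  have hm := PySem.Dict.mem_items_of_get?_eq_some pvSyn h
  have : pvSyn.items = pvPairs := by decide
  rwa [this] at hm

theorem step_some (s k v : List Char) (hg : pvSyn.get? k = some v)
    (hm : pvMatch s k) :
    pvBStep s k.length = some (String.ofList (v ++ s.drop k.length)) := by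
  unfold pvBStep
  rw [if_pos]
  · rw [PySem.List.slice_to_natCast, hm.1, hg, PySem.List.slice_from_natCast]
    rfl
  · rcases hm.2 with h | h
    · exact Or.inl h
    · right
      rw [PySem.List.pyGet?_natCast]
      exact h

theorem step_none (s : List Char) (q : Nat) (hq : q ≤ s.length)
    (H : ∀ k v, (k, v) ∈ pvPairs → k.length = q → ¬ pvMatch s k) :
    pvBStep s q = none := by
  unfold pvBStep
  by_cases hb : (q = s.length ∨ PySem.List.pyGet? s ((q : Nat) : Int) = some ' ')
  · rw [if_pos hb]
    rw [PySem.List.slice_to_natCast]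
    cases hg : pvSyn.get? (s.take q) with
    | none => rfl
    | some v =>
      exfalso
      have hmem := get?_mem _ _ hg
      have hlen : (s.take q).length = q := by simp [hq]
      refine H _ _ hmem hlen ⟨by rw [hlen], ?_⟩
      rw [hlen]
      rcases hb with h | h
      · exact Or.inl h
      · right; rw [PySem.List.pyGet?_natCast] at h; exact h
  · rw [if_neg hb]

theorem bnone (s : List Char) (p : Nat) (h : ∀ q, q ≤ p → pvBStep s q = none) :
    pvBLoop s p = String.ofList s := by
  induction p with
  | zero => unfold pvBLoop; rw [h 0 le_rfl]
  | succ n ih =>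
    unfold pvBLoop
    rw [h (n + 1) le_rfl]
    exact ih fun q hq => h q (Nat.le_succ_of_le hq)

theorem bfound (s : List Char) (r : String) (p q : Nat) (hqp : q ≤ p)
    (hr : pvBStep s q = some r)
    (habove : ∀ t, q < t → t ≤ p → pvBStep s t = none) :
    pvBLoop s p = r := by
  induction p with
  | zero =>
    interval_cases q
    unfold pvBLoop; rw [hr]
  | succ n ih =>
    unfold pvBLoop
    rcases Nat.lt_or_ge q (n + 1) with hlt | hge
    · rw [habove (n + 1) hlt le_rfl]
      exact ih (Nat.lt_succ_iff.mp hlt) fun t h1 h2 => habove t h1 (Nat.le_succ_of_le h2)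
    · have : q = n + 1 := le_antisymm hqp hge
      subst this
      rw [hr]

-- B's value when the stem IS a key
theorem case_exact (s k v : List Char) (hg : pvSyn.get? k = some v) (hc : s = k)
    (hk20 : k.length ≤ 20) :
    pvBLoop s (min s.length 20) = String.ofList v := by
  subst hc
  have hm : pvMatch s s := ⟨List.take_length, Or.inl rfl⟩
  have hstep := step_some s s v hg hm
  have hmin : min s.length 20 = s.length := by omega
  rw [hmin]
  rw [bfound s _ s.length s.length le_rfl hstep (fun t h1 h2 => absurd h1 (by omega))]
  simp

-- B's value when the stem starts with "key "
theorem case_prefix (s k v : List Char) (hg : pvSyn.get? k = some v)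
    (hd : PySem.Chars.startswith s (k ++ [' ']) = true) (hk20 : k.length ≤ 20)
    (habove : ∀ t, k.length < t → t ≤ min s.length 20 → pvBStep s t = none) :
    pvBLoop s (min s.length 20) = String.ofList (v ++ [' '] ++ s.drop (k.length + 1)) := by
  have hm : pvMatch s k := (match_iff s k).mpr (Or.inr hd)
  rw [PySem.Chars.startswith_iff] at hd
  have hlt : k.length < s.length := by
    obtain ⟨t, ht⟩ := hd
    have := congrArg List.length ht
    simp at this
    omega
  have hstep := step_some s k v hg hm
  have hval : String.ofList (v ++ s.drop k.length) =
      String.ofList (v ++ [' '] ++ s.drop (k.length + 1)) := by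
    rcases hm.2 with h | h
    · omega
    · have := List.getElem?_eq_some_iff.mp h
      rw [List.drop_eq_getElem_cons hlt, this.2]
      simp
  rw [bfound s _ (min s.length 20) k.length (by omega) hstep habove, hval]

theorem no_match_above (s : List Char) (m : Nat)
    (H : ∀ k v, (k, v) ∈ pvPairs → m < k.length → ¬ pvMatch s k) :
    ∀ t, m < t → t ≤ min s.length 20 → pvBStep s t = none := by
  intro t h1 h2
  apply step_none s t (by omega)
  intro k v hmem hlen hm
  exact H k v hmem (by omega) hm

-- ===== VERDICT (by name: the statement is the Claim_ definition above) =====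
theorem normalize_verb_prefix_py_spec : Claim_equal_normalize_verb_prefix_py := by
  intro stem _
  unfold Spec_normalize_verb_prefix_py normalize_verb_prefix_py normalize_verb_prefix_py_alt
  rw [pvKeys_eq, pvMaxKeyLen_eq]
  generalize stem.toList = s
  have hp0 : (min ((s.length : Nat) : Int) (20 : Int)).toNat = min s.length 20 := by omega
  rw [hp0]
  simp only [pvALoop]
  by_cases hc1 : s = "having meetings with".toList
  · have hg : pvSyn.get? "having meetings with".toList = some "meeting with".toList := by decide
    rw [if_pos hc1, hg, case_exact s _ _ hg hc1 (by decide)]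
    rfl
  rw [if_neg hc1]
  by_cases hd1 : PySem.Chars.startswith s ("having meetings with".toList ++ [' ']) = true
  · have hg : pvSyn.get? "having meetings with".toList = some "meeting with".toList := by decide
    have hab : ∀ t, ("having meetings with".toList).length < t → t ≤ min s.length 20 → pvBStep s t = none := by
      apply no_match_above
      intro k v hmem hgt hm
      simp only [pvPairs, List.mem_cons, List.not_mem_nil, or_false, Prod.mk.injEq] at hmem
      rcases hmem with ⟨rfl, rfl⟩ | ⟨rfl, rfl⟩ | ⟨rfl, rfl⟩ | ⟨rfl, rfl⟩ | ⟨rfl, rfl⟩ | ⟨rfl, rfl⟩ | ⟨rfl, rfl⟩ | ⟨rfl, rfl⟩ | ⟨rfl, rfl⟩ | ⟨rfl, rfl⟩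
      · exact absurd hgt (by decide)
      · exact absurd hgt (by decide)
      · exact absurd hgt (by decide)
      · exact absurd hgt (by decide)
      · exact absurd hgt (by decide)
      · exact absurd hgt (by decide)
      · exact absurd hgt (by decide)
      · exact absurd hgt (by decide)
      · exact absurd hgt (by decide)
      · exact absurd hgt (by decide)
    rw [if_pos hd1, hg, PySem.List.slice_from_natCast, case_prefix s _ _ hg hd1 (by decide) hab]
    simp
  rw [if_neg hd1]
  by_cases hc2 : s = "have meetings with".toList
  · have hg : pvSyn.get? "have meetings with".toList = some "meeting with".toList := by decide
    rw [if_pos hc2, hg, case_exact s _ _ hg hc2 (by decide)]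
    rfl
  rw [if_neg hc2]
  by_cases hd2 : PySem.Chars.startswith s ("have meetings with".toList ++ [' ']) = true
  · have hg : pvSyn.get? "have meetings with".toList = some "meeting with".toList := by decide
    have hab : ∀ t, ("have meetings with".toList).length < t → t ≤ min s.length 20 → pvBStep s t = none := by
      apply no_match_above
      intro k v hmem hgt hm
      simp only [pvPairs, List.mem_cons, List.not_mem_nil, or_false, Prod.mk.injEq] at hmem
      rcases hmem with ⟨rfl, rfl⟩ | ⟨rfl, rfl⟩ | ⟨rfl, rfl⟩ | ⟨rfl, rfl⟩ | ⟨rfl, rfl⟩ | ⟨rfl, rfl⟩ | ⟨rfl, rfl⟩ | ⟨rfl, rfl⟩ | ⟨rfl, rfl⟩ | ⟨rfl, rfl⟩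
      · exact absurd hgt (by decide)
      · exact absurd hgt (by decide)
      · exact absurd hgt (by decide)
      · exact absurd hgt (by decide)
      · exact absurd hgt (by decide)
      · exact absurd hgt (by decide)
      · rcases (match_iff s _).mp hm with h | h
        · exact hc1 h
        · exact hd1 h
      · exact absurd hgt (by decide)
      · exact absurd hgt (by decide)
      · exact absurd hgt (by decide)
    rw [if_pos hd2, hg, PySem.List.slice_from_natCast, case_prefix s _ _ hg hd2 (by decide) hab]
    simp
  rw [if_neg hd2]
  by_cases hc3 : s = "participating in".toList
  · have hg : pvSyn.get? "participating in".toList = some "attending".toList := by decide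
    rw [if_pos hc3, hg, case_exact s _ _ hg hc3 (by decide)]
    rfl
  rw [if_neg hc3]
  by_cases hd3 : PySem.Chars.startswith s ("participating in".toList ++ [' ']) = true
  · have hg : pvSyn.get? "participating in".toList = some "attending".toList := by decide
    have hab : ∀ t, ("participating in".toList).length < t → t ≤ min s.length 20 → pvBStep s t = none := by
      apply no_match_above
      intro k v hmem hgt hm
      simp only [pvPairs, List.mem_cons, List.not_mem_nil, or_false, Prod.mk.injEq] at hmem
      rcases hmem with ⟨rfl, rfl⟩ | ⟨rfl, rfl⟩ | ⟨rfl, rfl⟩ | ⟨rfl, rfl⟩ | ⟨rfl, rfl⟩ | ⟨rfl, rfl⟩ | ⟨rfl, rfl⟩ | ⟨rfl, rfl⟩ | ⟨rfl, rfl⟩ | ⟨rfl, rfl⟩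
      · exact absurd hgt (by decide)
      · exact absurd hgt (by decide)
      · exact absurd hgt (by decide)
      · exact absurd hgt (by decide)
      · exact absurd hgt (by decide)
      · exact absurd hgt (by decide)
      · rcases (match_iff s _).mp hm with h | h
        · exact hc1 h
        · exact hd1 h
      · rcases (match_iff s _).mp hm with h | h
        · exact hc2 h
        · exact hd2 h
      · exact absurd hgt (by decide)
      · exact absurd hgt (by decide)
    rw [if_pos hd3, hg, PySem.List.slice_from_natCast, case_prefix s _ _ hg hd3 (by decide) hab]
    simp
  rw [if_neg hd3]
  by_cases hc4 : s = "coming up with".toList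
  · have hg : pvSyn.get? "coming up with".toList = some "generating".toList := by decide
    rw [if_pos hc4, hg, case_exact s _ _ hg hc4 (by decide)]
    rfl
  rw [if_neg hc4]
  by_cases hd4 : PySem.Chars.startswith s ("coming up with".toList ++ [' ']) = true
  · have hg : pvSyn.get? "coming up with".toList = some "generating".toList := by decide
    have hab : ∀ t, ("coming up with".toList).length < t → t ≤ min s.length 20 → pvBStep s t = none := by
      apply no_match_above
      intro k v hmem hgt hm
      simp only [pvPairs, List.mem_cons, List.not_mem_nil, or_false, Prod.mk.injEq] at hmem
      rcases hmem with ⟨rfl, rfl⟩ | ⟨rfl, rfl⟩ | ⟨rfl, rfl⟩ | ⟨rfl, rfl⟩ | ⟨rfl, rfl⟩ | ⟨rfl, rfl⟩ | ⟨rfl, rfl⟩ | ⟨rfl, rfl⟩ | ⟨rfl, rfl⟩ | ⟨rfl, rfl⟩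
      · exact absurd hgt (by decide)
      · exact absurd hgt (by decide)
      · exact absurd hgt (by decide)
      · exact absurd hgt (by decide)
      · exact absurd hgt (by decide)
      · exact absurd hgt (by decide)
      · rcases (match_iff s _).mp hm with h | h
        · exact hc1 h
        · exact hd1 h
      · rcases (match_iff s _).mp hm with h | h
        · exact hc2 h
        · exact hd2 h
      · rcases (match_iff s _).mp hm with h | h
        · exact hc3 h
        · exact hd3 h
      · exact absurd hgt (by decide)
    rw [if_pos hd4, hg, PySem.List.slice_from_natCast, case_prefix s _ _ hg hd4 (by decide) hab]
    simp
  rw [if_neg hd4]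
  by_cases hc5 : s = "taking part in".toList
  · have hg : pvSyn.get? "taking part in".toList = some "attending".toList := by decide
    rw [if_pos hc5, hg, case_exact s _ _ hg hc5 (by decide)]
    rfl
  rw [if_neg hc5]
  by_cases hd5 : PySem.Chars.startswith s ("taking part in".toList ++ [' ']) = true
  · have hg : pvSyn.get? "taking part in".toList = some "attending".toList := by decide
    have hab : ∀ t, ("taking part in".toList).length < t → t ≤ min s.length 20 → pvBStep s t = none := by
      apply no_match_above
      intro k v hmem hgt hm
      simp only [pvPairs, List.mem_cons, List.not_mem_nil, or_false, Prod.mk.injEq] at hmem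
      rcases hmem with ⟨rfl, rfl⟩ | ⟨rfl, rfl⟩ | ⟨rfl, rfl⟩ | ⟨rfl, rfl⟩ | ⟨rfl, rfl⟩ | ⟨rfl, rfl⟩ | ⟨rfl, rfl⟩ | ⟨rfl, rfl⟩ | ⟨rfl, rfl⟩ | ⟨rfl, rfl⟩
      · exact absurd hgt (by decide)
      · exact absurd hgt (by decide)
      · exact absurd hgt (by decide)
      · exact absurd hgt (by decide)
      · exact absurd hgt (by decide)
      · exact absurd hgt (by decide)
      · rcases (match_iff s _).mp hm with h | h
        · exact hc1 h
        · exact hd1 h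
      · rcases (match_iff s _).mp hm with h | h
        · exact hc2 h
        · exact hd2 h
      · rcases (match_iff s _).mp hm with h | h
        · exact hc3 h
        · exact hd3 h
      · exact absurd hgt (by decide)
    rw [if_pos hd5, hg, PySem.List.slice_from_natCast, case_prefix s _ _ hg hd5 (by decide) hab]
    simp
  rw [if_neg hd5]
  by_cases hc6 : s = "come up with".toList
  · have hg : pvSyn.get? "come up with".toList = some "generating".toList := by decide
    rw [if_pos hc6, hg, case_exact s _ _ hg hc6 (by decide)]
    rfl
  rw [if_neg hc6]
  by_cases hd6 : PySem.Chars.startswith s ("come up with".toList ++ [' ']) = true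
  · have hg : pvSyn.get? "come up with".toList = some "generating".toList := by decide
    have hab : ∀ t, ("come up with".toList).length < t → t ≤ min s.length 20 → pvBStep s t = none := by
      apply no_match_above
      intro k v hmem hgt hm
      simp only [pvPairs, List.mem_cons, List.not_mem_nil, or_false, Prod.mk.injEq] at hmem
      rcases hmem with ⟨rfl, rfl⟩ | ⟨rfl, rfl⟩ | ⟨rfl, rfl⟩ | ⟨rfl, rfl⟩ | ⟨rfl, rfl⟩ | ⟨rfl, rfl⟩ | ⟨rfl, rfl⟩ | ⟨rfl, rfl⟩ | ⟨rfl, rfl⟩ | ⟨rfl, rfl⟩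
      · rcases (match_iff s _).mp hm with h | h
        · exact hc4 h
        · exact hd4 h
      · exact absurd hgt (by decide)
      · exact absurd hgt (by decide)
      · exact absurd hgt (by decide)
      · exact absurd hgt (by decide)
      · exact absurd hgt (by decide)
      · rcases (match_iff s _).mp hm with h | h
        · exact hc1 h
        · exact hd1 h
      · rcases (match_iff s _).mp hm with h | h
        · exact hc2 h
        · exact hd2 h
      · rcases (match_iff s _).mp hm with h | h
        · exact hc3 h
        · exact hd3 h
      · rcases (match_iff s _).mp hm with h | h
        · exact hc5 h
        · exact hd5 h
    rw [if_pos hd6, hg, PySem.List.slice_from_natCast, case_prefix s _ _ hg hd6 (by decide) hab]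
    simp
  rw [if_neg hd6]
  by_cases hc7 : s = "composing".toList
  · have hg : pvSyn.get? "composing".toList = some "writing".toList := by decide
    rw [if_pos hc7, hg, case_exact s _ _ hg hc7 (by decide)]
    rfl
  rw [if_neg hc7]
  by_cases hd7 : PySem.Chars.startswith s ("composing".toList ++ [' ']) = true
  · have hg : pvSyn.get? "composing".toList = some "writing".toList := by decide
    have hab : ∀ t, ("composing".toList).length < t → t ≤ min s.length 20 → pvBStep s t = none := by
      apply no_match_above
      intro k v hmem hgt hm
      simp only [pvPairs, List.mem_cons, List.not_mem_nil, or_false, Prod.mk.injEq] at hmem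
      rcases hmem with ⟨rfl, rfl⟩ | ⟨rfl, rfl⟩ | ⟨rfl, rfl⟩ | ⟨rfl, rfl⟩ | ⟨rfl, rfl⟩ | ⟨rfl, rfl⟩ | ⟨rfl, rfl⟩ | ⟨rfl, rfl⟩ | ⟨rfl, rfl⟩ | ⟨rfl, rfl⟩
      · rcases (match_iff s _).mp hm with h | h
        · exact hc4 h
        · exact hd4 h
      · rcases (match_iff s _).mp hm with h | h
        · exact hc6 h
        · exact hd6 h
      · exact absurd hgt (by decide)
      · exact absurd hgt (by decide)
      · exact absurd hgt (by decide)
      · exact absurd hgt (by decide)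
      · rcases (match_iff s _).mp hm with h | h
        · exact hc1 h
        · exact hd1 h
      · rcases (match_iff s _).mp hm with h | h
        · exact hc2 h
        · exact hd2 h
      · rcases (match_iff s _).mp hm with h | h
        · exact hc3 h
        · exact hd3 h
      · rcases (match_iff s _).mp hm with h | h
        · exact hc5 h
        · exact hd5 h
    rw [if_pos hd7, hg, PySem.List.slice_from_natCast, case_prefix s _ _ hg hd7 (by decide) hab]
    simp
  rw [if_neg hd7]
  by_cases hc8 : s = "authoring".toList
  · have hg : pvSyn.get? "authoring".toList = some "writing".toList := by decide
    rw [if_pos hc8, hg, case_exact s _ _ hg hc8 (by decide)]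
    rfl
  rw [if_neg hc8]
  by_cases hd8 : PySem.Chars.startswith s ("authoring".toList ++ [' ']) = true
  · have hg : pvSyn.get? "authoring".toList = some "writing".toList := by decide
    have hab : ∀ t, ("authoring".toList).length < t → t ≤ min s.length 20 → pvBStep s t = none := by
      apply no_match_above
      intro k v hmem hgt hm
      simp only [pvPairs, List.mem_cons, List.not_mem_nil, or_false, Prod.mk.injEq] at hmem
      rcases hmem with ⟨rfl, rfl⟩ | ⟨rfl, rfl⟩ | ⟨rfl, rfl⟩ | ⟨rfl, rfl⟩ | ⟨rfl, rfl⟩ | ⟨rfl, rfl⟩ | ⟨rfl, rfl⟩ | ⟨rfl, rfl⟩ | ⟨rfl, rfl⟩ | ⟨rfl, rfl⟩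
      · rcases (match_iff s _).mp hm with h | h
        · exact hc4 h
        · exact hd4 h
      · rcases (match_iff s _).mp hm with h | h
        · exact hc6 h
        · exact hd6 h
      · exact absurd hgt (by decide)
      · exact absurd hgt (by decide)
      · exact absurd hgt (by decide)
      · exact absurd hgt (by decide)
      · rcases (match_iff s _).mp hm with h | h
        · exact hc1 h
        · exact hd1 h
      · rcases (match_iff s _).mp hm with h | h
        · exact hc2 h
        · exact hd2 h
      · rcases (match_iff s _).mp hm with h | h
        · exact hc3 h
        · exact hd3 h
      · rcases (match_iff s _).mp hm with h | h
        · exact hc5 h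
        · exact hd5 h
    rw [if_pos hd8, hg, PySem.List.slice_from_natCast, case_prefix s _ _ hg hd8 (by decide) hab]
    simp
  rw [if_neg hd8]
  by_cases hc9 : s = "creating".toList
  · have hg : pvSyn.get? "creating".toList = some "generating".toList := by decide
    rw [if_pos hc9, hg, case_exact s _ _ hg hc9 (by decide)]
    rfl
  rw [if_neg hc9]
  by_cases hd9 : PySem.Chars.startswith s ("creating".toList ++ [' ']) = true
  · have hg : pvSyn.get? "creating".toList = some "generating".toList := by decide
    have hab : ∀ t, ("creating".toList).length < t → t ≤ min s.length 20 → pvBStep s t = none := by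
      apply no_match_above
      intro k v hmem hgt hm
      simp only [pvPairs, List.mem_cons, List.not_mem_nil, or_false, Prod.mk.injEq] at hmem
      rcases hmem with ⟨rfl, rfl⟩ | ⟨rfl, rfl⟩ | ⟨rfl, rfl⟩ | ⟨rfl, rfl⟩ | ⟨rfl, rfl⟩ | ⟨rfl, rfl⟩ | ⟨rfl, rfl⟩ | ⟨rfl, rfl⟩ | ⟨rfl, rfl⟩ | ⟨rfl, rfl⟩
      · rcases (match_iff s _).mp hm with h | h
        · exact hc4 h
        · exact hd4 h
      · rcases (match_iff s _).mp hm with h | h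
        · exact hc6 h
        · exact hd6 h
      · exact absurd hgt (by decide)
      · exact absurd hgt (by decide)
      · rcases (match_iff s _).mp hm with h | h
        · exact hc7 h
        · exact hd7 h
      · rcases (match_iff s _).mp hm with h | h
        · exact hc8 h
        · exact hd8 h
      · rcases (match_iff s _).mp hm with h | h
        · exact hc1 h
        · exact hd1 h
      · rcases (match_iff s _).mp hm with h | h
        · exact hc2 h
        · exact hd2 h
      · rcases (match_iff s _).mp hm with h | h
        · exact hc3 h
        · exact hd3 h
      · rcases (match_iff s _).mp hm with h | h
        · exact hc5 h
        · exact hd5 h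
    rw [if_pos hd9, hg, PySem.List.slice_from_natCast, case_prefix s _ _ hg hd9 (by decide) hab]
    simp
  rw [if_neg hd9]
  by_cases hc10 : s = "drafting".toList
  · have hg : pvSyn.get? "drafting".toList = some "writing".toList := by decide
    rw [if_pos hc10, hg, case_exact s _ _ hg hc10 (by decide)]
    rfl
  rw [if_neg hc10]
  by_cases hd10 : PySem.Chars.startswith s ("drafting".toList ++ [' ']) = true
  · have hg : pvSyn.get? "drafting".toList = some "writing".toList := by decide
    have hab : ∀ t, ("drafting".toList).length < t → t ≤ min s.length 20 → pvBStep s t = none := by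
      apply no_match_above
      intro k v hmem hgt hm
      simp only [pvPairs, List.mem_cons, List.not_mem_nil, or_false, Prod.mk.injEq] at hmem
      rcases hmem with ⟨rfl, rfl⟩ | ⟨rfl, rfl⟩ | ⟨rfl, rfl⟩ | ⟨rfl, rfl⟩ | ⟨rfl, rfl⟩ | ⟨rfl, rfl⟩ | ⟨rfl, rfl⟩ | ⟨rfl, rfl⟩ | ⟨rfl, rfl⟩ | ⟨rfl, rfl⟩
      · rcases (match_iff s _).mp hm with h | h
        · exact hc4 h
        · exact hd4 h
      · rcases (match_iff s _).mp hm with h | h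
        · exact hc6 h
        · exact hd6 h
      · exact absurd hgt (by decide)
      · exact absurd hgt (by decide)
      · rcases (match_iff s _).mp hm with h | h
        · exact hc7 h
        · exact hd7 h
      · rcases (match_iff s _).mp hm with h | h
        · exact hc8 h
        · exact hd8 h
      · rcases (match_iff s _).mp hm with h | h
        · exact hc1 h
        · exact hd1 h
      · rcases (match_iff s _).mp hm with h | h
        · exact hc2 h
        · exact hd2 h
      · rcases (match_iff s _).mp hm with h | h
        · exact hc3 h
        · exact hd3 h
      · rcases (match_iff s _).mp hm with h | h
        · exact hc5 h
        · exact hd5 h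
    rw [if_pos hd10, hg, PySem.List.slice_from_natCast, case_prefix s _ _ hg hd10 (by decide) hab]
    simp
  rw [if_neg hd10]
  rw [bnone s _ ?_]
  intro q hq
  apply step_none s q (by omega)
  intro k v hmem _ hm
  simp only [pvPairs, List.mem_cons, List.not_mem_nil, or_false, Prod.mk.injEq] at hmem
  rcases hmem with ⟨rfl, rfl⟩ | ⟨rfl, rfl⟩ | ⟨rfl, rfl⟩ | ⟨rfl, rfl⟩ | ⟨rfl, rfl⟩ | ⟨rfl, rfl⟩ | ⟨rfl, rfl⟩ | ⟨rfl, rfl⟩ | ⟨rfl, rfl⟩ | ⟨rfl, rfl⟩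
  · rcases (match_iff s _).mp hm with h | h
    · exact hc4 h
    · exact hd4 h
  · rcases (match_iff s _).mp hm with h | h
    · exact hc6 h
    · exact hd6 h
  · rcases (match_iff s _).mp hm with h | h
    · exact hc9 h
    · exact hd9 h
  · rcases (match_iff s _).mp hm with h | h
    · exact hc10 h
    · exact hd10 h
  · rcases (match_iff s _).mp hm with h | h
    · exact hc7 h
    · exact hd7 h
  · rcases (match_iff s _).mp hm with h | h
    · exact hc8 h
    · exact hd8 h
  · rcases (match_iff s _).mp hm with h | h
    · exact hc1 h
    · exact hd1 h
  · rcases (match_iff s _).mp hm with h | h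
    · exact hc2 h
    · exact hd2 h
  · rcases (match_iff s _).mp hm with h | h
    · exact hc3 h
    · exact hd3 h
  · rcases (match_iff s _).mp hm with h | h
    · exact hc5 h
    · exact hd5 h
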